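-- pv_equiv track=rewrite | github.com/Orloh/py_module03 | ex5/ft_data_stream.py | event_generator
-- ===== SOURCE A (Python) =====
-- from typing import Generator
--
-- def event_generator(total: int) -> Generator[tuple[str, int, str], None, None]:
--     """
--     Yield game events as (player, level, action)
--     """
--     names = ["alice", "bob", "charlie", "diana"]
--     levels = [5, 8, 3, 10]
--     actions = ["killed monster", "found treasure", "leveled up"]
--
--     for index in range(total):
--         name = names[index % len(names)]
--         level = levels[index % len(levels)]
--         action = actions[index % len(actions)]
--         if action == "leveled up":
--              level += 1
--         yield (name, level, action)
-- ===== SOURCE B (Python) =====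
-- def event_generator(total: int):
--     """
--     Yield game events as (player, level, action)
--     """
--     names = ["alice", "bob", "charlie", "diana"]
--     levels = [5, 8, 3, 10]
--     actions = ["killed monster", "found treasure", "leveled up"]
--
--     # One full period of the cyclic sequence (LCM(4, 3) = 12), built once by
--     # zipping repeated lists; the "leveled up" bonus is applied in the table.
--     pattern = [(n, l + (a == "leveled up"), a)
--                for n, l, a in zip(names * 3, levels * 3, actions * 4)]
--
--     for index in range(total):
--         yield pattern[index % 12]
-- ===== Notes on version B (the rewrite author's own statement) =====
-- stated objective: alternative
-- what changed: B precomputes one full period of the cyclic sequence once by zipping repeated lists (with the 'leveled up' bonus baked into the table) and then emits pattern entries by cyclic indexing, instead of recomputing three modular lookups and a branch per event.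
import Mathlib
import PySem

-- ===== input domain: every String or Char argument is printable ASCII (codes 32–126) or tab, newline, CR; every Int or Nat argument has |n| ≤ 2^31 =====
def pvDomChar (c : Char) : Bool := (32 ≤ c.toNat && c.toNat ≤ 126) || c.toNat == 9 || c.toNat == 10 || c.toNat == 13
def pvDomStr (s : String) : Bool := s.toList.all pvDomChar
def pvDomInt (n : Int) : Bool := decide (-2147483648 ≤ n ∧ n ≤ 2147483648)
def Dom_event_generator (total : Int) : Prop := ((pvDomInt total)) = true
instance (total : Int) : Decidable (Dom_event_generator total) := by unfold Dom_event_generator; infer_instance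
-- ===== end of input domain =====

-- B builds the 12-event period once (zip of repeated lists, bonus in the table) and emits pattern[index % 12]; alternative decomposition, same cost.

-- ===== PORT A =====
def event_generator (total : Int) : List (String × Int × String) :=
  let names : List String := ["alice", "bob", "charlie", "diana"]
  let levels : List Int := [5, 8, 3, 10]
  let actions : List String := ["killed monster", "found treasure", "leveled up"]
  (PySem.List.pyRange 0 total 1).map (fun index =>
    let name := PySem.List.pyGetD names (PySem.Int.mod index 4) ""
    let level := PySem.List.pyGetD levels (PySem.Int.mod index 4) 0
    let action := PySem.List.pyGetD actions (PySem.Int.mod index 3) ""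
    let level := if action == "leveled up" then level + 1 else level
    (name, level, action))

-- ===== PORT B =====
def event_generator_alt (total : Int) : List (String × Int × String) :=
  let names : List String := ["alice", "bob", "charlie", "diana"]
  let levels : List Int := [5, 8, 3, 10]
  let actions : List String := ["killed monster", "found treasure", "leveled up"]
  let pattern : List (String × Int × String) :=
    (List.zip (names ++ names ++ names)
      (List.zip (levels ++ levels ++ levels) (actions ++ actions ++ actions ++ actions))).map
      (fun nla => (nla.1, nla.2.1 + (if nla.2.2 == "leveled up" then 1 else 0), nla.2.2))
  (PySem.List.pyRange 0 total 1).map (fun index =>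
    PySem.List.pyGetD pattern (PySem.Int.mod index 12) ("", 0, ""))

-- ===== PRECONDITION & SPEC =====
def Spec_event_generator (total : Int) (out : List (String × Int × String)) : Prop := out = event_generator_alt total
instance (total : Int) (out : List (String × Int × String)) : Decidable (Spec_event_generator total out) := by unfold Spec_event_generator; infer_instance

-- ===== CLAIM (what is proved, stated in full; the proofs are below) =====
def Claim_equal_event_generator : Prop := ∀ (total : Int), Dom_event_generator total → Spec_event_generator total (event_generator total)

-- ===== LEMMAS AND PROOFS =====

theorem event_generator_point (n : Nat) :
    (let names : List String := ["alice", "bob", "charlie", "diana"]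
     let levels : List Int := [5, 8, 3, 10]
     let actions : List String := ["killed monster", "found treasure", "leveled up"]
     let name := PySem.List.pyGetD names (PySem.Int.mod (n : Int) 4) ""
     let level := PySem.List.pyGetD levels (PySem.Int.mod (n : Int) 4) 0
     let action := PySem.List.pyGetD actions (PySem.Int.mod (n : Int) 3) ""
     let level := if action == "leveled up" then level + 1 else level
     ((name, level, action) : String × Int × String))
    =
    (let names : List String := ["alice", "bob", "charlie", "diana"]
     let levels : List Int := [5, 8, 3, 10]
     let actions : List String := ["killed monster", "found treasure", "leveled up"]
     let pattern : List (String × Int × String) :=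
       (List.zip (names ++ names ++ names)
         (List.zip (levels ++ levels ++ levels) (actions ++ actions ++ actions ++ actions))).map
         (fun nla => (nla.1, nla.2.1 + (if nla.2.2 == "leveled up" then 1 else 0), nla.2.2))
     PySem.List.pyGetD pattern (PySem.Int.mod (n : Int) 12) ("", 0, "")) := by
  have m4 : PySem.Int.mod (n : Int) 4 = ((n % 4 : Nat) : Int) := by
    exact_mod_cast PySem.Int.mod_natCast n 4
  have m3 : PySem.Int.mod (n : Int) 3 = ((n % 3 : Nat) : Int) := by
    exact_mod_cast PySem.Int.mod_natCast n 3
  have m12 : PySem.Int.mod (n : Int) 12 = ((n % 12 : Nat) : Int) := by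
    exact_mod_cast PySem.Int.mod_natCast n 12
  rw [m4, m3, m12]
  simp only [PySem.List.pyGetD_natCast]
  have h4 : n % 4 = (n % 12) % 4 := by omega
  have h3 : n % 3 = (n % 12) % 3 := by omega
  rw [h4, h3]
  have h12 : n % 12 < 12 := by omega
  generalize n % 12 = r at h12
  interval_cases r <;> decide

-- ===== VERDICT (by name: the statement is the Claim_ definition above) =====
theorem event_generator_spec : Claim_equal_event_generator := by
  intro total _
  unfold Spec_event_generator event_generator event_generator_alt
  apply List.map_congr_left
  intro x hx
  rw [PySem.List.mem_pyRange_one] at hx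
  obtain ⟨n, rfl⟩ := Int.eq_ofNat_of_zero_le hx.1
  exact event_generator_point n
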